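-- pv_equiv track=rewrite | github.com/zMenta/Python-Exercises | w3resourcesExercises/Puzzles/02.py | verify_list
-- ===== SOURCE A (Python) =====
-- def verify_list(array: list):
--     nineteen_counter = 0
--     five_counter = 0
--
--     for num in array:
--         if num == 19:
--             nineteen_counter += 1
--         elif num == 5:
--             five_counter += 1
--
--     if nineteen_counter == 2 and five_counter >= 3:
--         return True
--
--     return False
-- ===== SOURCE B (Python) =====
-- def verify_list(array: list):
--     # Different algorithm: sort the list, then locate the runs of 19 and 5 by
--     # hand-written binary search; the run length is a difference of boundary indices.
--     s = sorted(array)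
--     n = len(s)
--
--     def first_at_least(t):
--         # lower-bound binary search: first index i with s[i] >= t (n if none)
--         lo, hi = 0, n
--         while lo < hi:
--             mid = (lo + hi) // 2
--             if s[mid] < t:
--                 lo = mid + 1
--             else:
--                 hi = mid
--         return lo
--
--     return (first_at_least(20) - first_at_least(19) == 2
--             and first_at_least(6) - first_at_least(5) >= 3)
-- ===== Notes on version B (the rewrite author's own statement) =====
-- stated objective: alternative
-- what changed: Replaces the single counting pass with sort-then-binary-search: the list is sorted and the multiplicities of 19 and 5 are obtained as differences of lower-bound binary-search boundary indices.
import Mathlib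
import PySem

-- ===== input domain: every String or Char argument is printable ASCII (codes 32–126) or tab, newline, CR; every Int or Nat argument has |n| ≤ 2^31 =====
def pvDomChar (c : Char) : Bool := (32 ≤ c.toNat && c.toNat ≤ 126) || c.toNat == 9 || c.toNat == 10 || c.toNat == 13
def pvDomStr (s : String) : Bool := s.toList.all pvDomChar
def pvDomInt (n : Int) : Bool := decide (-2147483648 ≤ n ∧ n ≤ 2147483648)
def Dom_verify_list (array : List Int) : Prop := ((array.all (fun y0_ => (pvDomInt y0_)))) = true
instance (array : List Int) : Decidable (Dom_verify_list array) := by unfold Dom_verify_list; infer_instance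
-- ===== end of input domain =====

-- B replaces A's single counting loop by sort + hand-written lower-bound binary
-- searches; return values are proved equal (objective: alternative).

-- ===== PORT A =====
-- the loop accumulating (nineteen_counter, five_counter), then the final test
def verifyLoop (acc : Int × Int) (num : Int) : Int × Int :=
  if num == 19 then (acc.1 + 1, acc.2)
  else if num == 5 then (acc.1, acc.2 + 1)
  else acc

def verify_list (array : List Int) : Bool :=
  let c := array.foldl verifyLoop (0, 0)
  if c.1 == 2 && c.2 ≥ 3 then true else false

-- ===== PORT B =====
-- first_at_least: lower-bound binary search on the sorted list (the while loop of Source B;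
-- s[mid] is always in range when taken, so getD's default 0 is never the value used)
def bsLower (s : List Int) (t : Int) (lo hi : Nat) : Nat :=
  if lo < hi then
    let mid := (lo + hi) / 2
    if s.getD mid 0 < t then bsLower s t (mid + 1) hi
    else bsLower s t lo mid
  else lo
termination_by hi - lo
decreasing_by all_goals omega

def verify_list_alt (array : List Int) : Bool :=
  let s := PySem.List.sorted array (fun x => x) false
  let n := s.length
  let fal := fun t => bsLower s t 0 n
  ((fal 20 : Int) - (fal 19 : Int) == 2) && ((fal 6 : Int) - (fal 5 : Int) ≥ 3)

-- ===== PRECONDITION & SPEC =====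
def Spec_verify_list (array : List Int) (out : Bool) : Prop := out = verify_list_alt array
instance (array : List Int) (out : Bool) : Decidable (Spec_verify_list array out) := by unfold Spec_verify_list; infer_instance

-- ===== CLAIM (what is proved, stated in full; the proofs are below) =====
def Claim_equal_verify_list : Prop := ∀ (array : List Int), Dom_verify_list array → Spec_verify_list array (verify_list array)

-- ===== LEMMAS AND PROOFS =====

theorem verifyLoop_counts (array : List Int) (n f : Int) :
    array.foldl verifyLoop (n, f) = (n + array.count 19, f + array.count 5) := by
  induction array generalizing n f with
  | nil => simp
  | cons x xs ih =>
    simp only [List.foldl_cons, verifyLoop]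
    by_cases h19 : x = 19
    · simp [h19, ih]; ring
    · by_cases h5 : x = 5
      · simp [h5, ih]; ring
      · simp [h19, h5, ih]

-- binary-search characterisation: on a monotone list the result splits indices at t
theorem bsLower_char (s : List Int) (t : Int)
    (hmono : ∀ i j, i ≤ j → j < s.length → s.getD i 0 ≤ s.getD j 0) :
    ∀ (k lo hi : Nat), hi - lo = k → lo ≤ hi → hi ≤ s.length →
    (∀ i, i < lo → s.getD i 0 < t) →
    (∀ i, hi ≤ i → i < s.length → t ≤ s.getD i 0) →
    bsLower s t lo hi ≤ s.length ∧
    (∀ i, i < bsLower s t lo hi → s.getD i 0 < t) ∧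
    (∀ i, bsLower s t lo hi ≤ i → i < s.length → t ≤ s.getD i 0) := by
  intro k
  induction k using Nat.strong_induction_on with
  | _ k ih =>
    intro lo hi hk hle hhi hlt hge
    rw [bsLower]
    by_cases h : lo < hi
    · simp only [h, if_true]
      set mid := (lo + hi) / 2 with hmid
      by_cases hv : s.getD mid 0 < t
      · simp only [hv, if_true]
        refine ih (hi - (mid + 1)) (by omega) (mid + 1) hi (by omega) (by omega) hhi ?_ hge
        intro i hi2
        exact lt_of_le_of_lt (hmono i mid (by omega) (by omega)) hv
      · simp only [hv, if_false]
        refine ih (mid - lo) (by omega) lo mid (by omega) (by omega) (by omega) hlt ?_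
        intro i hmi hilen
        exact le_trans (le_of_not_gt hv) (hmono mid i hmi hilen)
    · simp only [h, if_false]
      exact ⟨by omega, fun i hi2 => hlt i hi2, fun i h1 h2 => by
        by_cases h3 : hi ≤ i
        · exact hge i h3 h2
        · exact absurd h1 (by omega)⟩

-- a predicate true exactly on the first r indices has countP r
theorem countP_of_split (s : List Int) (p : Int → Bool) :
    ∀ (r : Nat), r ≤ s.length →
    (∀ i, i < r → p (s.getD i 0) = true) →
    (∀ i, r ≤ i → i < s.length → p (s.getD i 0) = false) →
    s.countP p = r := by
  induction s with
  | nil => intro r hr _ _; simp at hr ⊢; omega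
  | cons x xs ih =>
    intro r hr h1 h2
    match r with
    | 0 =>
      have hx : p x = false := h2 0 (by omega) (by simp)
      simp only [List.countP_cons, hx, Bool.false_eq_true, if_false, add_zero]
      exact ih 0 (by omega) (by omega) (fun i _ hi => h2 (i + 1) (by omega) (by simpa using hi))
    | r + 1 =>
      have hx : p x = true := h1 0 (by omega)
      simp only [List.countP_cons, hx, if_true]
      have := ih r (by simpa using hr) (fun i hi => h1 (i + 1) (by omega))
        (fun i hi hi2 => h2 (i + 1) (by omega) (by simpa using hi2))
      omega

theorem countP_lt_split (s : List Int) (v : Int) :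
    s.countP (fun x => decide (x < v + 1)) = s.countP (fun x => decide (x < v)) + s.count v := by
  induction s with
  | nil => simp
  | cons x xs ih =>
    simp only [List.countP_cons, List.count_cons, ih]
    by_cases hx : x = v
    · simp [hx]; omega
    · have h1 : (x < v + 1) ↔ (x < v) := by omega
      simp [hx, h1]
      split_ifs <;> omega

-- bsLower over the whole sorted list computes countP (· < t)
theorem bsLower_countP (array : List Int) (t : Int) :
    bsLower (PySem.List.sorted array (fun x => x) false) t 0
        (PySem.List.sorted array (fun x => x) false).length
      = array.countP (fun x => decide (x < t)) := by
  set s := PySem.List.sorted array (fun x => x) false with hs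
  have hpw : s.Pairwise (fun a b => a ≤ b) := by
    simpa using PySem.List.sorted_pairwise array (fun x => x)
  have hmono : ∀ i j, i ≤ j → j < s.length → s.getD i 0 ≤ s.getD j 0 := by
    intro i j hij hj
    rcases Nat.eq_or_lt_of_le hij with h | h
    · rw [h]
    · rw [List.getD_eq_getElem s 0 (by omega), List.getD_eq_getElem s 0 hj]
      exact List.pairwise_iff_getElem.mp hpw i j (by omega) hj h
  obtain ⟨hle, h1, h2⟩ := bsLower_char s t hmono (s.length - 0) 0 s.length rfl (by omega) le_rfl
    (by omega) (fun i h _ => by omega)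
  have hcp : s.countP (fun x => decide (x < t)) = bsLower s t 0 s.length := by
    refine countP_of_split s _ _ hle ?_ ?_
    · intro i hi; simpa using h1 i hi
    · intro i hi hi2; simpa using h2 i hi hi2
  rw [← hcp]
  exact (PySem.List.sorted_perm array (fun x => x) false).countP_eq _

-- ===== VERDICT (by name: the statement is the Claim_ definition above) =====
theorem verify_list_spec : Claim_equal_verify_list := by
  intro array _
  unfold Spec_verify_list verify_list verify_list_alt
  simp only [verifyLoop_counts, bsLower_countP]
  have h19 := countP_lt_split array 19
  have h5 := countP_lt_split array 5
  have e19 : (20 : Int) = 19 + 1 := by norm_num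
  have e5 : (6 : Int) = 5 + 1 := by norm_num
  rw [e19, e5, h19, h5]
  push_cast
  by_cases hc : (array.count 19 : Int) = 2 <;>
    by_cases hf : (3 : Int) ≤ (array.count 5 : Int) <;>
      simp_all
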